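-- pv_equiv track=rewrite | github.com/wooxi/xhs-image-fetcher | backend/xhs_search_cdp.py | convert_to_hd_url
-- ===== SOURCE A (Python) =====
-- def convert_to_hd_url(url: str) -> str:
--     """将预览图 URL 转换为高清格式。
--
--     转换规则：
--     - 协议: http:// -> https://
--     - 后缀: !nc_n_webp_prv_1 -> !nd_dft_wlteh_webp_3
--     - 后缀: !nc_n_webp_mw_1 -> !nd_dft_wlteh_webp_3
--     """
--     if not url:
--         return url
--
--     # 协议转换: http -> https
--     if url.startswith("http://"):
--         url = "https://" + url[7:]
--
--     # 后缀转换: 预览/缩略图 -> 高清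
--     # 常见的预览图后缀格式
--     preview_suffixes = [
--         "!nc_n_webp_prv_1",
--         "!nc_n_webp_mw_1",
--         "!nc_n_webp_prv",
--         "!nc_n_webp_mw",
--     ]
--
--     # 高清格式后缀
--     hd_suffix = "!nd_dft_wlteh_webp_3"
--
--     for suffix in preview_suffixes:
--         if url.endswith(suffix):
--             url = url[:-len(suffix)] + hd_suffix
--             break
--
--     return url
-- ===== SOURCE B (Python) =====
-- _PREVIEW_SUFFIXES = {
--     "!nc_n_webp_prv_1",
--     "!nc_n_webp_mw_1",
--     "!nc_n_webp_prv",
--     "!nc_n_webp_mw",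
-- }
-- _HD_SUFFIX = "!nd_dft_wlteh_webp_3"
--
--
-- def convert_to_hd_url(url: str) -> str:
--     if not url:
--         return url
--     if url.startswith("http://"):
--         url = "https://" + url[7:]
--     i = url.rfind("!")
--     if i >= 0 and url[i:] in _PREVIEW_SUFFIXES:
--         url = url[:i] + _HD_SUFFIX
--     return url
-- ===== Notes on version B (the rewrite author's own statement) =====
-- stated objective: alternative
-- what changed: Replaces A's ordered loop over four candidate suffixes with endswith/slice per candidate by a single reverse find of the exclamation-mark delimiter and one set-membership test of the tail, rewriting via that index.
import Mathlib
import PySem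

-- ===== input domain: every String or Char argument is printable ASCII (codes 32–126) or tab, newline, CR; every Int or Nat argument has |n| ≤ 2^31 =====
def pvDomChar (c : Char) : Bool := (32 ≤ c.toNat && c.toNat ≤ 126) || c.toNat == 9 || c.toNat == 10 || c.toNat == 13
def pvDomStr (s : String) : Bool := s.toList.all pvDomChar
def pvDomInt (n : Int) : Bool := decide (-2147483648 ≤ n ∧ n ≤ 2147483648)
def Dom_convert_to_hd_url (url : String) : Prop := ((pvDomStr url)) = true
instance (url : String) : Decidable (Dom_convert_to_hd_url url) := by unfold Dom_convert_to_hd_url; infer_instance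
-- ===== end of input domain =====

-- B replaces A's ordered four-suffix endswith loop by a single rfind('!') locating the last '!'
-- and one set-membership test on the tail (objective: alternative; same cost, return value proved equal).


-- ===== PORT A =====
def pvHdA : List Char := "!nd_dft_wlteh_webp_3".toList

def pvSuffixesA : List (List Char) :=
  ["!nc_n_webp_prv_1".toList, "!nc_n_webp_mw_1".toList,
   "!nc_n_webp_prv".toList, "!nc_n_webp_mw".toList]

-- the `for suffix in preview_suffixes: … break` loop of A
def pvLoopA : List (List Char) → List Char → List Char
  | [], u => u
  | s :: rest, u =>
    if PySem.Chars.endswith u s then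
      PySem.Chars.slice u none (some (-(s.length : Int))) ++ pvHdA
    else pvLoopA rest u

def convert_to_hd_url (url : String) : String :=
  if url = "" then url
  else
    let u := if PySem.Chars.startswith url.toList "http://".toList then
               "https://".toList ++ PySem.Chars.slice url.toList (some 7) none
             else url.toList
    String.ofList (pvLoopA pvSuffixesA u)

-- ===== PORT B =====
def pvHdB : List Char := "!nd_dft_wlteh_webp_3".toList

def pvPreviewSetB : List (List Char) :=
  ["!nc_n_webp_prv_1".toList, "!nc_n_webp_mw_1".toList,
   "!nc_n_webp_prv".toList, "!nc_n_webp_mw".toList]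

def convert_to_hd_url_alt (url : String) : String :=
  if url = "" then url
  else
    let u := if PySem.Chars.startswith url.toList "http://".toList then
               "https://".toList ++ PySem.Chars.slice url.toList (some 7) none
             else url.toList
    let i := PySem.Chars.rfind u "!".toList
    if 0 ≤ i ∧ PySem.Chars.slice u (some i) none ∈ pvPreviewSetB then
      String.ofList (PySem.Chars.slice u none (some i) ++ pvHdB)
    else String.ofList u

-- ===== PRECONDITION & SPEC =====
def Spec_convert_to_hd_url (url : String) (out : String) : Prop := out = convert_to_hd_url_alt url
instance (url : String) (out : String) : Decidable (Spec_convert_to_hd_url url out) := by unfold Spec_convert_to_hd_url; infer_instance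

-- ===== CLAIM (what is proved, stated in full; the proofs are below) =====
def Claim_equal_convert_to_hd_url : Prop := ∀ (url : String), Dom_convert_to_hd_url url → Spec_convert_to_hd_url url (convert_to_hd_url url)

-- ===== LEMMAS AND PROOFS =====

-- [c] is a prefix of (s.drop m) exactly when s[m]? = some c
lemma pvSingletonPrefixDrop (s : List Char) (m : Nat) (c : Char) :
    [c] <+: s.drop m ↔ s[m]? = some c := by
  rw [← List.head?_drop]
  cases h : s.drop m with
  | nil => simp
  | cons a t => simp [List.cons_prefix_iff, eq_comm]

-- rfind.go returns the highest '!' index at or below its fuel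
lemma pvGo_eq (s : List Char) (k : Nat) (hk : s[k]? = some '!') :
    ∀ n, k ≤ n → (∀ j, k < j → j ≤ n → s[j]? ≠ some '!') →
    PySem.Chars.rfind.go s "!".toList n = (k : Int) := by
  intro n
  induction n with
  | zero =>
    intro hkn _
    interval_cases k
    have hpre : ([ '!' ] : List Char) <+: s := by
      have := (pvSingletonPrefixDrop s 0 '!').mpr hk
      simpa using this
    simp [PySem.Chars.rfind.go, hpre]
  | succ j ih =>
    intro hkn hnone
    by_cases hkj : k = j + 1
    · subst hkj
      have hpre : ([ '!' ] : List Char) <+: s.drop (j + 1) :=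
        (pvSingletonPrefixDrop s (j + 1) '!').mpr hk
      simp [PySem.Chars.rfind.go, hpre]
    · have hnot : ¬ (([ '!' ] : List Char) <+: s.drop (j + 1)) := by
        rw [pvSingletonPrefixDrop]
        exact hnone (j + 1) (by omega) (by omega)
      have := ih (by omega) (fun m hm1 hm2 => hnone m hm1 (by omega))
      simpa [PySem.Chars.rfind.go, hnot] using this

-- every preview suffix starts with '!' and contains no other '!'
lemma pvSuffixShape (sk : List Char) (h : sk ∈ pvSuffixesA) :
    sk[0]? = some '!' ∧ '!' ∉ sk.drop 1 := by
  fin_cases h <;> decide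

-- if u = p ++ sk with sk a preview suffix, the last '!' of u is at index p.length
lemma pvRfind_at_suffix (p sk : List Char) (h : sk ∈ pvSuffixesA) :
    PySem.Chars.rfind (p ++ sk) "!".toList = (p.length : Int) := by
  obtain ⟨hhead, htail⟩ := pvSuffixShape sk h
  have hget : (p ++ sk)[p.length]? = some '!' := by
    rw [List.getElem?_append_right (le_refl _)]
    simpa using hhead
  have hnone : ∀ j, p.length < j → j ≤ (p ++ sk).length → (p ++ sk)[j]? ≠ some '!' := by
    intro j hj _ hcontra
    rw [List.getElem?_append_right (by omega)] at hcontra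
    have hmem : '!' ∈ sk.drop 1 := by
      have hidx : (sk.drop 1)[j - p.length - 1]? = some '!' := by
        rw [List.getElem?_drop]
        have he : 1 + (j - p.length - 1) = j - p.length := by omega
        rw [he]; exact hcontra
      exact List.mem_of_getElem? hidx
    exact htail hmem
  unfold PySem.Chars.rfind
  exact pvGo_eq _ _ hget _ (by simp) hnone

-- the core equivalence of the two suffix-rewriting steps
lemma pvStep_eq (u : List Char) :
    pvLoopA pvSuffixesA u =
      (if 0 ≤ PySem.Chars.rfind u "!".toList ∧
          PySem.Chars.slice u (some (PySem.Chars.rfind u "!".toList)) none ∈ pvPreviewSetB then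
        PySem.Chars.slice u none (some (PySem.Chars.rfind u "!".toList)) ++ pvHdB
      else u) := by
  have branch : ∀ sk ∈ pvSuffixesA, PySem.Chars.endswith u sk = true →
      PySem.Chars.slice u none (some (-(sk.length : Int))) ++ pvHdA =
      (if 0 ≤ PySem.Chars.rfind u "!".toList ∧
          PySem.Chars.slice u (some (PySem.Chars.rfind u "!".toList)) none ∈ pvPreviewSetB then
        PySem.Chars.slice u none (some (PySem.Chars.rfind u "!".toList)) ++ pvHdB
      else u) := by
    intro sk hmem hend
    obtain ⟨p, rfl⟩ := (PySem.Chars.endswith_iff u sk).mp hend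
    rw [pvRfind_at_suffix p sk hmem]
    have hfrom : PySem.Chars.slice (p ++ sk) (some (p.length : Int)) none = sk := by
      rw [PySem.Chars.slice_eq_listSlice, PySem.List.slice_from_natCast, List.drop_left]
    have hto : PySem.Chars.slice (p ++ sk) none (some (p.length : Int)) = p := by
      rw [PySem.Chars.slice_eq_listSlice, PySem.List.slice_to_natCast, List.take_left]
    rw [if_pos ⟨Int.natCast_nonneg _, by rw [hfrom]; exact hmem⟩, hto]
    have hkpos : 0 < sk.length := by fin_cases hmem <;> decide
    rw [PySem.Chars.slice_eq_listSlice, PySem.List.slice_to_neg_natCast _ _ hkpos]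
    have he : (p ++ sk).length - sk.length = p.length := by simp
    rw [he, List.take_left]
    rfl
  by_cases h1 : PySem.Chars.endswith u "!nc_n_webp_prv_1".toList = true
  · rw [show pvLoopA pvSuffixesA u =
        PySem.Chars.slice u none (some (-(("!nc_n_webp_prv_1".toList.length : Nat) : Int))) ++ pvHdA by
      simp only [pvSuffixesA, pvLoopA, if_pos h1]]
    exact branch _ (by simp [pvSuffixesA]) h1
  · by_cases h2 : PySem.Chars.endswith u "!nc_n_webp_mw_1".toList = true
    · rw [show pvLoopA pvSuffixesA u =
          PySem.Chars.slice u none (some (-(("!nc_n_webp_mw_1".toList.length : Nat) : Int))) ++ pvHdA by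
        simp only [pvSuffixesA, pvLoopA, if_neg h1, if_pos h2]]
      exact branch _ (by simp [pvSuffixesA]) h2
    · by_cases h3 : PySem.Chars.endswith u "!nc_n_webp_prv".toList = true
      · rw [show pvLoopA pvSuffixesA u =
            PySem.Chars.slice u none (some (-(("!nc_n_webp_prv".toList.length : Nat) : Int))) ++ pvHdA by
          simp only [pvSuffixesA, pvLoopA, if_neg h1, if_neg h2, if_pos h3]]
        exact branch _ (by simp [pvSuffixesA]) h3
      · by_cases h4 : PySem.Chars.endswith u "!nc_n_webp_mw".toList = true
        · rw [show pvLoopA pvSuffixesA u =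
              PySem.Chars.slice u none (some (-(("!nc_n_webp_mw".toList.length : Nat) : Int))) ++ pvHdA by
            simp only [pvSuffixesA, pvLoopA, if_neg h1, if_neg h2, if_neg h3, if_pos h4]]
          exact branch _ (by simp [pvSuffixesA]) h4
        · -- no preview suffix at the end: B's test must fail too
          have hfail : ¬ (0 ≤ PySem.Chars.rfind u "!".toList ∧
              PySem.Chars.slice u (some (PySem.Chars.rfind u "!".toList)) none ∈ pvPreviewSetB) := by
            rintro ⟨hpos, hmem⟩
            rw [PySem.Chars.slice_eq_listSlice, PySem.List.slice_from u hpos] at hmem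
            have hend : PySem.Chars.endswith u (u.drop (PySem.Chars.rfind u "!".toList).toNat) = true :=
              (PySem.Chars.endswith_iff _ _).mpr (List.drop_suffix _ _)
            simp only [pvPreviewSetB, List.mem_cons, List.not_mem_nil, or_false] at hmem
            rcases hmem with h | h | h | h
            · exact h1 (h ▸ hend)
            · exact h2 (h ▸ hend)
            · exact h3 (h ▸ hend)
            · exact h4 (h ▸ hend)
          rw [if_neg hfail]
          simp only [pvSuffixesA, pvLoopA, if_neg h1, if_neg h2, if_neg h3, if_neg h4]

-- ===== VERDICT (by name: the statement is the Claim_ definition above) =====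
theorem convert_to_hd_url_spec : Claim_equal_convert_to_hd_url := by
  intro url _
  unfold Spec_convert_to_hd_url convert_to_hd_url convert_to_hd_url_alt
  by_cases hempty : url = ""
  · simp [hempty]
  · simp only [if_neg hempty]
    rw [pvStep_eq]
    exact apply_ite String.ofList _ _ _
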